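-- pv_equiv track=rewrite | github.com/intaekimme/TIL | algo/codetree/python/two_number_group.py | f
-- ===== SOURCE A (Python) =====
-- def f(arr: list) -> int:
--     new_arr = []
--
--     flag = False
--     while arr:
--         if flag:
--             new_arr.append(min(arr))
--             arr.pop(arr.index(min(arr)))
--             flag = False
--         else:
--             new_arr.append(max(arr))
--             arr.pop(arr.index(max(arr)))
--             flag = True
--
--     min_val = 0
--     for i in range(0, len(new_arr), 2):
--         if min_val < new_arr[i] + new_arr[i + 1]:
--             min_val = new_arr[i] + new_arr[i + 1]
--
--     return min_val
-- ===== SOURCE B (Python) =====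
-- def f(arr: list) -> int:
--     s = sorted(arr)
--     n = len(s)
--     best = 0
--     for k in range(n // 2):
--         p = s[k] + s[n - 1 - k]
--         if best < p:
--             best = p
--     return best
-- ===== Notes on version B (the rewrite author's own statement) =====
-- stated objective: faster
-- what changed: Replaced the repeated max/min scans with pops (quadratic) by a single sort followed by pairing s[k] with s[n-1-k] in one linear pass; B also leaves the input list intact where A empties it.
import Mathlib
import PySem

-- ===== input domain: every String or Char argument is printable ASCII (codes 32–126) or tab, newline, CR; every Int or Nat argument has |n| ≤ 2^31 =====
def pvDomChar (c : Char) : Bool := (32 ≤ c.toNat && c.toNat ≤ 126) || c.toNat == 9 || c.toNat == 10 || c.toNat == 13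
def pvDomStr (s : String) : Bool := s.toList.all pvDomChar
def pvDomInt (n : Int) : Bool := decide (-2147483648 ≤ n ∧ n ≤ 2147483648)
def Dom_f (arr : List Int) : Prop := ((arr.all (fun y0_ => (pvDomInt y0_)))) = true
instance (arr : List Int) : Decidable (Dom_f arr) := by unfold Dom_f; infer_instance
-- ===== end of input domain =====

-- B replaces A's quadratic alternating max/min pop scans by one sort plus a linear pairing pass
-- (measured asymptotically faster); equivalence is about the RETURN value only: A empties its
-- argument list in place, B does not mutate it.


-- ===== PORT A =====
-- the while loop: alternately pop max (flag = false) / min (flag = true), appending the value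
def fLoopA (arr newArr : List Int) (flag : Bool) : List Int :=
  if harr : arr = [] then newArr
  else if flag then
    match PySem.List.min? arr (fun y => y) with
    | none => newArr
    | some v =>
      match PySem.List.index? arr v with
      | none => newArr
      | some i =>
        match hp : PySem.List.pop? arr (i : Int) with
        | none => newArr
        | some pr => fLoopA pr.2 (newArr ++ [v]) false
  else
    match PySem.List.max? arr (fun y => y) with
    | none => newArr
    | some v =>
      match PySem.List.index? arr v with
      | none => newArr
      | some i =>
        match hp : PySem.List.pop? arr (i : Int) with
        | none => newArr
        | some pr => fLoopA pr.2 (newArr ++ [v]) true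
termination_by arr.length
decreasing_by
  · have := PySem.List.length_of_pop?_eq_some arr hp; omega
  · have := PySem.List.length_of_pop?_eq_some arr hp; omega

def f (arr : List Int) : Int :=
  let newArr := fLoopA arr [] false
  (PySem.List.pyRange 0 (newArr.length : Int) 2).foldl
    (fun minVal i =>
      match PySem.List.pyGet? newArr i, PySem.List.pyGet? newArr (i + 1) with
      | some x, some y => if minVal < x + y then x + y else minVal
      | _, _ => minVal)  -- none unreachable under Pre_f (Python raises IndexError there)
    0

-- ===== PORT B =====
def f_alt (arr : List Int) : Int :=
  let s := PySem.List.sorted arr (fun y => y) false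
  let n : Int := (s.length : Int)
  (PySem.List.pyRange 0 (PySem.Int.floordiv n 2) 1).foldl
    (fun best k =>
      let p := PySem.List.pyGetD s k 0 + PySem.List.pyGetD s (n - 1 - k) 0
      if best < p then p else best)
    0

-- ===== PRECONDITION & SPEC =====
-- Pre_f: on odd-length lists A's pairing loop reads new_arr[i+1] one past the end (IndexError)
def Pre_f (arr : List Int) : Prop := arr.length % 2 = 0
instance (arr : List Int) : Decidable (Pre_f arr) := by unfold Pre_f; infer_instance
def pvWitness_f : List Int := [3, 1, 2, 4]

def Spec_f (arr : List Int) (out : Int) : Prop := out = f_alt arr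
instance (arr : List Int) (out : Int) : Decidable (Spec_f arr out) := by unfold Spec_f; infer_instance

-- ===== CLAIM (what is proved, stated in full; the proofs are below) =====
def Claim_equal_f : Prop := ∀ (arr : List Int), Dom_f arr → Pre_f arr → Spec_f arr (f arr)

-- ===== LEMMAS AND PROOFS =====

theorem eraseIdx_pre_eq_erase (pre suf : List Int) (v : Int) (hnot : v ∉ pre) :
    (pre ++ v :: suf).eraseIdx pre.length = (pre ++ v :: suf).erase v := by
  induction pre with
  | nil => simp
  | cons x t ih =>
    simp only [List.cons_append, List.eraseIdx_cons_succ, List.length_cons]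
    rw [List.erase_cons_tail]
    · rw [ih (by simp at hnot; exact hnot.2)]
    · simp at hnot; exact by simp; exact fun h => absurd h.symm hnot.1

theorem pop_index_erase (arr : List Int) (v : Int) (hv : v ∈ arr) :
    ∃ k : Nat, PySem.List.index? arr v = some k ∧
      PySem.List.pop? arr (k : Int) = some (v, arr.erase v) := by
  have hs : (PySem.List.index? arr v).isSome := (PySem.List.index?_isSome_iff arr v).mpr hv
  obtain ⟨k, hk⟩ := Option.isSome_iff_exists.mp hs
  refine ⟨k, hk, ?_⟩
  obtain ⟨pre, suf, hdecomp, hlen, hnot⟩ := (PySem.List.index?_eq_some_iff arr v k).mp hk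
  obtain ⟨hklt, hget, -⟩ := PySem.List.getElem_of_index?_eq_some hk
  rw [PySem.List.pop?_natCast arr k hklt, hget]
  congr 1
  subst hdecomp; subst hlen
  rw [eraseIdx_pre_eq_erase pre suf v hnot]

theorem sorted_max_decomp (arr : List Int) (v : Int)
    (h : PySem.List.max? arr (fun y => y) = some v) :
    PySem.List.sorted arr (fun y => y) false
      = PySem.List.sorted (arr.erase v) (fun y => y) false ++ [v] := by
  have hv : v ∈ arr := PySem.List.max?_mem h
  have hmax := PySem.List.max?_isMax h
  have hp1 : ((PySem.List.sorted (arr.erase v) (fun y => y) false) ++ [v]).Perm (v :: arr.erase v) :=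
    ((PySem.List.sorted_perm _ _ false).append_right [v]).trans (List.perm_append_singleton v _)
  have hperm2 : ((PySem.List.sorted (arr.erase v) (fun y => y) false) ++ [v]).Perm arr :=
    hp1.trans (List.perm_cons_erase hv).symm
  apply PySem.List.eq_of_perm_of_pairwise_le_of_injective (fun y : Int => y) (fun a b hab => hab)
    ((PySem.List.sorted_perm arr _ false).trans hperm2.symm)
  · exact PySem.List.sorted_pairwise arr _
  · rw [List.pairwise_append]
    refine ⟨PySem.List.sorted_pairwise _ _, List.pairwise_singleton _ _, ?_⟩
    intro a ha b hb
    simp only [List.mem_singleton] at hb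
    have hae : a ∈ arr.erase v := (PySem.List.sorted_perm _ _ false).mem_iff.mp ha
    simpa [hb] using hmax a (List.mem_of_mem_erase hae)

theorem sorted_min_decomp (arr : List Int) (v : Int)
    (h : PySem.List.min? arr (fun y => y) = some v) :
    PySem.List.sorted arr (fun y => y) false
      = v :: PySem.List.sorted (arr.erase v) (fun y => y) false := by
  have hv : v ∈ arr := PySem.List.min?_mem h
  have hmin := PySem.List.min?_isMin h
  have hperm2 : (v :: PySem.List.sorted (arr.erase v) (fun y => y) false).Perm arr :=
    ((PySem.List.sorted_perm _ _ false).cons v).trans (List.perm_cons_erase hv).symm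
  apply PySem.List.eq_of_perm_of_pairwise_le_of_injective (fun y : Int => y) (fun a b hab => hab)
    ((PySem.List.sorted_perm arr _ false).trans hperm2.symm)
  · exact PySem.List.sorted_pairwise arr _
  · rw [List.pairwise_cons]
    refine ⟨?_, PySem.List.sorted_pairwise _ _⟩
    intro b hb
    have : b ∈ arr.erase v := (PySem.List.sorted_perm _ _ false).mem_iff.mp hb
    exact hmin b (List.mem_of_mem_erase this)

def weave (s : List Int) (flag : Bool) : List Int :=
  if h : s = [] then []
  else if flag then s.head h :: weave s.tail false
  else s.getLast h :: weave s.dropLast true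
termination_by s.length
decreasing_by
  · simpa using Nat.pred_lt (by simpa [List.length_eq_zero_iff] using h)
  · have : s.length ≠ 0 := by simpa [List.length_eq_zero_iff] using h
    simp [List.length_dropLast]; omega

theorem weave_nil (flag : Bool) : weave [] flag = [] := by
  rw [weave]; simp

theorem weave_cons_true (v : Int) (t : List Int) : weave (v :: t) true = v :: weave t false := by
  rw [weave]; simp

theorem weave_concat_false (l : List Int) (v : Int) :
    weave (l ++ [v]) false = v :: weave l true := by
  rw [weave]; simp

theorem fLoopA_eq (n : Nat) : ∀ arr acc flag, arr.length ≤ n →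
    fLoopA arr acc flag = acc ++ weave (PySem.List.sorted arr (fun y => y) false) flag := by
  induction n with
  | zero =>
    intro arr acc flag h
    have : arr = [] := by simpa [List.length_eq_zero_iff] using Nat.le_zero.mp h
    subst this
    rw [fLoopA]
    simp [PySem.List.sorted, weave_nil]
  | succ n ih =>
    intro arr acc flag h
    by_cases harr : arr = []
    · subst harr; rw [fLoopA]; simp [PySem.List.sorted, weave_nil]
    · rw [fLoopA]
      simp only [harr, dite_false]
      cases flag with
      | true =>
        obtain ⟨v, hmin⟩ : ∃ v, PySem.List.min? arr (fun y => y) = some v := by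
          rcases hm : PySem.List.min? arr (fun y => y) with _ | v
          · exact absurd ((PySem.List.min?_eq_none_iff arr _).mp hm) harr
          · exact ⟨v, rfl⟩
        obtain ⟨k, hidx, hpop⟩ := pop_index_erase arr v (PySem.List.min?_mem hmin)
        have hlen : (arr.erase v).length ≤ n := by
          have := List.length_erase_of_mem (PySem.List.min?_mem hmin)
          have h0 : arr.length ≠ 0 := by simpa [List.length_eq_zero_iff] using harr
          omega
        rw [if_pos rfl]
        simp only [hmin, hidx]
        split
        · next heq => rw [hpop] at heq; cases heq
        · next pr heq =>
            rw [hpop] at heq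
            injection heq with heq'
            subst heq'
            rw [ih (arr.erase v) (acc ++ [v]) false hlen,
              sorted_min_decomp arr v hmin, weave_cons_true]
            simp
      | false =>
        obtain ⟨v, hmax⟩ : ∃ v, PySem.List.max? arr (fun y => y) = some v := by
          rcases hm : PySem.List.max? arr (fun y => y) with _ | v
          · exact absurd ((PySem.List.max?_eq_none_iff arr _).mp hm) harr
          · exact ⟨v, rfl⟩
        obtain ⟨k, hidx, hpop⟩ := pop_index_erase arr v (PySem.List.max?_mem hmax)
        have hlen : (arr.erase v).length ≤ n := by
          have := List.length_erase_of_mem (PySem.List.max?_mem hmax)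
          have h0 : arr.length ≠ 0 := by simpa [List.length_eq_zero_iff] using harr
          omega
        rw [if_neg (by simp)]
        simp only [hmax, hidx]
        split
        · next heq => rw [hpop] at heq; cases heq
        · next pr heq =>
            rw [hpop] at heq
            injection heq with heq'
            subst heq'
            rw [ih (arr.erase v) (acc ++ [v]) true hlen,
              sorted_max_decomp arr v hmax, weave_concat_false]
            simp

def abody (l : List Int) (mv i : Int) : Int :=
  match PySem.List.pyGet? l i, PySem.List.pyGet? l (i + 1) with
  | some x, some y => if mv < x + y then x + y else mv
  | _, _ => mv

def AloopGo (l : List Int) (init : Int) : Int :=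
  (PySem.List.pyRange 0 (l.length : Int) 2).foldl (abody l) init

theorem AloopGo_nil (init : Int) : AloopGo [] init = init := rfl

theorem AloopGo_cons2 (x y : Int) (rest : List Int) (init : Int) :
    AloopGo (x :: y :: rest) init = AloopGo rest (if init < x + y then x + y else init) := by
  unfold AloopGo
  have h1 : (((x :: y :: rest).length : Nat) : Int) = (rest.length : Int) + 2 := by
    simp; ring
  rw [h1, PySem.List.pyRange_of_pos 0 ((rest.length : Int) + 2) (by norm_num),
      PySem.List.pyRange_of_pos 0 (rest.length : Int) (by norm_num)]
  have hcnt : (if (0:Int) < (rest.length : Int) + 2 then ((((rest.length : Int) + 2) - 0 + 2 - 1) / 2).toNat else 0)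
      = ((if (0:Int) < (rest.length : Int) then (((rest.length : Int) - 0 + 2 - 1) / 2).toNat else 0)) + 1 := by
    by_cases h : (0:Int) < (rest.length : Int)
    · rw [if_pos (by omega), if_pos h]; omega
    · rw [if_pos (by omega), if_neg h]
      have : (rest.length : Int) = 0 := by omega
      rw [this]; norm_num
  rw [hcnt, List.range_succ_eq_map, List.map_cons, List.foldl_cons, List.map_map, List.foldl_map,
    List.foldl_map]
  have hfirst : abody (x :: y :: rest) init (0 + 2 * (0:Nat)) = (if init < x + y then x + y else init) := by
    have hnn : (0:Int) ≤ (rest.length:Int) + 1 := by positivity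
    simp [abody, PySem.List.pyGet?, PySem.List.pyIdx?, hnn]
  rw [hfirst]
  apply PySem.List.foldl_congr_mem
  intro acc k hk
  show abody (x :: y :: rest) acc (0 + 2 * ((k:Int) + 1)) = abody rest acc (0 + 2 * (k:Int))
  have e1 : (0:Int) + 2 * ((k:Int) + 1) = ((2 * k + 2 : Nat) : Int) := by push_cast; ring
  have e2 : (0:Int) + 2 * ((k:Int) + 1) + 1 = ((2 * k + 3 : Nat) : Int) := by push_cast; ring
  have e3 : (0:Int) + 2 * (k:Int) = ((2 * k : Nat) : Int) := by push_cast; ring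
  have e4 : (0:Int) + 2 * (k:Int) + 1 = ((2 * k + 1 : Nat) : Int) := by push_cast; ring
  unfold abody
  rw [e1]  -- then pyGet?_natCast
  rw [PySem.List.pyGet?_natCast]
  rw [show ((2*k+2 : Nat):Int) + 1 = ((2*k+3 : Nat):Int) by push_cast; ring]
  rw [e3, PySem.List.pyGet?_natCast]
  rw [show ((2*k : Nat):Int) + 1 = ((2*k+1 : Nat):Int) by push_cast; ring]
  rw [PySem.List.pyGet?_natCast, PySem.List.pyGet?_natCast]
  simp [List.getElem?_cons_succ]

def bbody (s : List Int) (n : Int) (best k : Int) : Int :=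
  let p := PySem.List.pyGetD s k 0 + PySem.List.pyGetD s (n - 1 - k) 0
  if best < p then p else best

def Bgo (s : List Int) (init : Int) : Int :=
  (PySem.List.pyRange 0 (PySem.Int.floordiv (s.length : Int) 2) 1).foldl
    (bbody s (s.length : Int)) init

theorem Bgo_nil (init : Int) : Bgo [] init = init := rfl

theorem Bgo_wrap (a b : Int) (l : List Int) (init : Int) :
    Bgo (a :: (l ++ [b])) init = Bgo l (if init < a + b then a + b else init) := by
  unfold Bgo
  have hL : (((a :: (l ++ [b])).length : Nat) : Int) = (l.length : Int) + 2 := by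
    simp; ring
  rw [hL]
  have hq : PySem.Int.floordiv ((l.length : Int) + 2) 2 = PySem.Int.floordiv (l.length : Int) 2 + 1 := by
    rw [PySem.Int.floordiv_eq_ediv_of_pos (by norm_num), PySem.Int.floordiv_eq_ediv_of_pos (by norm_num)]
    omega
  have hq0 : 0 ≤ PySem.Int.floordiv (l.length : Int) 2 := by
    rw [PySem.Int.floordiv_eq_ediv_of_pos (by norm_num)]; positivity
  rw [hq, PySem.List.pyRange_one_cons (by omega), PySem.List.pyRange_one, PySem.List.pyRange_one]
  simp only [sub_zero, List.foldl_cons, List.foldl_map]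
  have hfirst : bbody (a :: (l ++ [b])) ((l.length : Int) + 2) init 0 = (if init < a + b then a + b else init) := by
    unfold bbody
    have e1 : PySem.List.pyGetD (a :: (l ++ [b])) 0 0 = a := by
      have hnn : (0:Int) ≤ (l.length:Int) + 1 := by positivity
      simp [PySem.List.pyGetD, PySem.List.pyGet?, PySem.List.pyIdx?, hnn]
    have e2 : (l.length : Int) + 2 - 1 - 0 = ((l.length + 1 : Nat) : Int) := by push_cast; ring
    have e3 : PySem.List.pyGetD (a :: (l ++ [b])) ((l.length : Int) + 2 - 1 - 0) 0 = b := by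
      rw [e2, PySem.List.pyGetD_natCast]
      simp
    rw [e1, e3]
  rw [hfirst]
  have hcnt : ((PySem.Int.floordiv (l.length : Int) 2 + 1 - (0 + 1))).toNat = (PySem.Int.floordiv (l.length : Int) 2).toNat := by omega
  rw [hcnt]
  apply PySem.List.foldl_congr_mem
  intro acc k hk
  have hkq : (k : Int) < PySem.Int.floordiv (l.length : Int) 2 := by
    have := List.mem_range.mp hk
    omega
  have hk2 : 2 * (k : Int) < (l.length : Int) := by
    rw [PySem.Int.floordiv_eq_ediv_of_pos (by norm_num)] at hkq
    omega
  show bbody (a :: (l ++ [b])) ((l.length : Int) + 2) acc (0 + 1 + (k : Int))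
      = bbody l (l.length : Int) acc (0 + (k : Int))
  unfold bbody
  have g1 : PySem.List.pyGetD (a :: (l ++ [b])) (0 + 1 + (k : Int)) 0 = PySem.List.pyGetD l (0 + (k : Int)) 0 := by
    rw [show ((0:Int) + 1 + (k : Int)) = ((k + 1 : Nat) : Int) by push_cast; ring,
        show ((0 : Int) + (k : Int)) = ((k : Nat) : Int) by ring,
        PySem.List.pyGetD_natCast, PySem.List.pyGetD_natCast]
    have hkl : k < l.length := by omega
    simp [List.getElem?_cons_succ, List.getElem?_append_left hkl]
  have g2 : PySem.List.pyGetD (a :: (l ++ [b])) ((l.length : Int) + 2 - 1 - (0 + 1 + (k : Int))) 0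
      = PySem.List.pyGetD l ((l.length : Int) - 1 - (0 + (k : Int))) 0 := by
    have hkl : k < l.length := by omega
    rw [show ((l.length : Int) + 2 - 1 - (0 + 1 + (k : Int))) = ((l.length - k : Nat) : Int) by push_cast [Nat.cast_sub (le_of_lt hkl)]; ring,
        show ((l.length : Int) - 1 - (0 + (k : Int))) = ((l.length - 1 - k : Nat) : Int) by omega,
        PySem.List.pyGetD_natCast, PySem.List.pyGetD_natCast]
    have h1 : 0 < l.length - k := by omega
    rw [show (l.length - k) = (l.length - 1 - k) + 1 by omega]
    rw [List.getD_cons_succ]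
    have h2 : l.length - 1 - k < l.length := by omega
    simp [List.getD_eq_getElem?_getD, List.getElem?_append_left h2]
  rw [g1, g2]


theorem main_fold (n : Nat) : ∀ s : List Int, s.length ≤ n → s.length % 2 = 0 →
    ∀ init, AloopGo (weave s false) init = Bgo s init := by
  induction n with
  | zero =>
    intro s hle hev init
    have : s = [] := by simpa [List.length_eq_zero_iff] using Nat.le_zero.mp hle
    subst this
    rw [weave_nil, AloopGo_nil, Bgo_nil]
  | succ n ih =>
    intro s hle hev init
    match s with
    | [] => rw [weave_nil, AloopGo_nil, Bgo_nil]
    | a :: t =>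
      have ht : t ≠ [] := by
        intro h; subst h; simp at hev
      have hdecomp : a :: t = (a :: t.dropLast) ++ [t.getLast ht] := by
        simp [List.dropLast_concat_getLast ht]
      rw [hdecomp, weave_concat_false, weave_cons_true, AloopGo_cons2]
      have hlen : t.dropLast.length ≤ n := by
        have := @List.length_dropLast Int t
        have h0 : t.length ≠ 0 := by simpa [List.length_eq_zero_iff] using ht
        simp at hle ⊢; omega
      have hev' : t.dropLast.length % 2 = 0 := by
        have := @List.length_dropLast Int t
        have h0 : t.length ≠ 0 := by simpa [List.length_eq_zero_iff] using ht
        simp at hev; omega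
      rw [ih t.dropLast hlen hev']
      rw [show (a :: t.dropLast ++ [t.getLast ht]) = (a :: (t.dropLast ++ [t.getLast ht])) from rfl,
          Bgo_wrap, Int.add_comm (t.getLast ht) a]

-- ===== VERDICT (by name: the statement is the Claim_ definition above) =====
theorem f_spec : Claim_equal_f := by
  intro arr _ hpre
  unfold Spec_f Pre_f at *
  have hA : f arr = AloopGo (fLoopA arr [] false) 0 := rfl
  have hB : f_alt arr = Bgo (PySem.List.sorted arr (fun y => y) false) 0 := rfl
  rw [hA, hB, fLoopA_eq arr.length arr [] false le_rfl, List.nil_append]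
  exact main_fold arr.length _ (by rw [PySem.List.length_sorted]) (by rw [PySem.List.length_sorted]; exact hpre) 0
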